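-- pv_equiv track=rewrite | github.com/pn11/benkyokai | competitive/AtCoder/zone2021/D_retry.py | solve
-- ===== SOURCE A (Python) =====
-- def solve(S):
--     r_flag = False
--     T = ""
--     for i in range(len(S)):
--         s = S[i]
--         if s == 'R':
--             r_flag = not r_flag
--             continue
--         if r_flag:
--             if len(T) > 0 and T[0] == s:
--                 T = T[1:]
--             else:
--                 T = s + T
--         else:
--             if len(T) > 0 and T[-1] == s:
--                 T = T[:-1]
--             else:
--                 T += s
--     if r_flag:
--         return T[::-1]
--     else:
--         return T
-- ===== SOURCE B (Python) =====
-- def solve(S):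
--     # Stage 1: route each letter to the front or back stream by the parity of
--     # preceding 'R's; no cancellation happens here.
--     front = []
--     back = []
--     rev = False
--     for s in S:
--         if s == 'R':
--             rev = not rev
--         elif rev:
--             front.append(s)
--         else:
--             back.append(s)
--     # Stage 2: one standard stack pass cancelling adjacent equal letters over
--     # the rearranged word (correct because the cancellation rewriting system is
--     # confluent: the reduced word is unique however cancellations are ordered).
--     st = []
--     for c in front[::-1] + back:
--         if st and st[-1] == c:
--             st.pop()
--         else:
--             st.append(c)
--     return ''.join(reversed(st)) if rev else ''.join(st)
-- ===== Notes on version B (the rewrite author's own statement) =====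
-- stated objective: faster
-- what changed: Replaces A's single-pass simulation (direction flag with end-dependent whole-string rebuilds) by two staged passes: first route every letter to a front or back stream by the parity of preceding 'R's with no cancellation, then reduce the rearranged word reversed(front)+back with one standard stack pass cancelling adjacent equal letters, which is correct because adjacent-equal cancellation is confluent.
import Mathlib
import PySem

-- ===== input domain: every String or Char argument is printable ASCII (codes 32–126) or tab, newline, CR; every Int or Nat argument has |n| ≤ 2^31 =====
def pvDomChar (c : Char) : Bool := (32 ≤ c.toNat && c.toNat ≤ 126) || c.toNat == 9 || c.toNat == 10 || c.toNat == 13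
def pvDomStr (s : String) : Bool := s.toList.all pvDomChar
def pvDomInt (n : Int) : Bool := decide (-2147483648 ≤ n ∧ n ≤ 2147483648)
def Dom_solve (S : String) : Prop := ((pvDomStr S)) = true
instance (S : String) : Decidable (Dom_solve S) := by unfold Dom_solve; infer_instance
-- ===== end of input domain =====

-- B replaces A's flag-and-rebuild simulation by two staged passes (route streams, then one
-- stack-cancellation pass); objective: faster.

-- ===== PORT A =====
-- one loop step of A over the state (r_flag, T), T as a list of chars
def stepA (st : Bool × List Char) (s : Char) : Bool × List Char :=
  if s = 'R' then (!st.1, st.2)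
  else if st.1 then
    if st.2.length > 0 ∧ st.2.head? = some s then (st.1, st.2.tail)  -- T = T[1:]
    else (st.1, s :: st.2)                                           -- T = s + T
  else
    if st.2.length > 0 ∧ st.2.getLast? = some s then (st.1, st.2.dropLast)  -- T = T[:-1]
    else (st.1, st.2 ++ [s])                                                -- T += s

def solve (S : String) : String :=
  let fin := S.toList.foldl stepA (false, [])
  if fin.1 then String.ofList fin.2.reverse else String.ofList fin.2

-- ===== PORT B =====
-- stage-1 step: route a character to the front or back stream (no cancellation)
def routeB (st : Bool × List Char × List Char) (s : Char) : Bool × List Char × List Char :=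
  if s = 'R' then (!st.1, st.2)
  else if st.1 then (st.1, st.2.1 ++ [s], st.2.2)
  else (st.1, st.2.1, st.2.2 ++ [s])

-- stage-2 step: standard stack pass cancelling adjacent equal letters
def cancelB (st : List Char) (c : Char) : List Char :=
  if st ≠ [] ∧ st.getLast? = some c then st.dropLast else st ++ [c]

def solve_alt (S : String) : String :=
  let r := S.toList.foldl routeB (false, [], [])
  let st := (r.2.1.reverse ++ r.2.2).foldl cancelB []
  if r.1 then String.ofList st.reverse else String.ofList st

-- ===== PRECONDITION & SPEC =====
def Spec_solve (S : String) (out : String) : Prop := out = solve_alt S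
instance (S : String) (out : String) : Decidable (Spec_solve S out) := by unfold Spec_solve; infer_instance

-- ===== CLAIM (what is proved, stated in full; the proofs are below) =====
def Claim_equal_solve : Prop := ∀ (S : String), Dom_solve S → Spec_solve S (solve S)

-- ===== LEMMAS AND PROOFS =====

-- A's front-insertion step, as a function (exactly A's r_flag branch)
def fstep (c : Char) (t : List Char) : List Char :=
  if t.length > 0 ∧ t.head? = some c then t.tail else c :: t

-- the fully cancelled form of a word, computed left to right (B's stage 2)
def red (w : List Char) : List Char := w.foldl cancelB []

theorem red_append_singleton (w : List Char) (c : Char) :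
    red (w ++ [c]) = cancelB (red w) c := by
  simp [red, List.foldl_append]

-- cancellation step on a word written with its last letter explicit
theorem cancelB_concat (l : List Char) (b d : Char) :
    cancelB (l ++ [b]) d = if b = d then l else l ++ [b, d] := by
  simp only [cancelB, ne_eq, List.append_eq_nil_iff, List.cons_ne_self,
    and_false, not_false_eq_true, List.getLast?_concat, Option.some.injEq, true_and,
    List.dropLast_concat, List.append_assoc, List.singleton_append]

-- front-insertion step on a word written with its first letter explicit
theorem fstep_cons (c a : Char) (m : List Char) :
    fstep c (a :: m) = if a = c then m else c :: a :: m := by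
  simp [fstep]

-- key commutation: a back-cancellation step commutes with a front-insertion step
theorem cancel_fstep_comm (t : List Char) (c d : Char) :
    cancelB (fstep c t) d = fstep c (cancelB t d) := by
  rcases t with _ | ⟨a, m⟩
  · -- t = []
    by_cases h : c = d <;> simp [cancelB, fstep, h] <;>
      intro h' <;> exact absurd h'.symm h
  · rcases m.eq_nil_or_concat with rfl | ⟨m', b, rfl⟩
    · -- t = [a]
      by_cases hac : a = c <;> by_cases had : a = d <;>
        simp_all [cancelB, fstep]
      all_goals first
        | rfl
        | (by_cases hcd : c = d <;> simp_all [eq_comm])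
    · -- t = a :: m' ++ [b] (length ≥ 2: the two ends are independent)
      simp only [List.concat_eq_append]
      rw [fstep_cons,
        show a :: (m' ++ [b]) = (a :: m') ++ [b] from rfl, cancelB_concat]
      by_cases hac : a = c
      · subst hac
        rw [if_pos rfl, cancelB_concat]
        by_cases hbd : b = d
        · rw [if_pos hbd, if_pos hbd, fstep_cons, if_pos rfl]
        · rw [if_neg hbd, if_neg hbd,
            show (a :: m') ++ [b, d] = a :: (m' ++ [b, d]) from rfl,
            fstep_cons, if_pos rfl]
      · rw [if_neg hac]
        by_cases hbd : b = d
        · rw [if_pos hbd,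
            show c :: ((a :: m') ++ [b]) = (c :: a :: m') ++ [b] from rfl, cancelB_concat,
            if_pos hbd, fstep_cons, if_neg hac]
        · rw [if_neg hbd,
            show c :: ((a :: m') ++ [b]) = (c :: a :: m') ++ [b] from rfl, cancelB_concat,
            if_neg hbd,
            show (a :: m') ++ [b, d] = a :: (m' ++ [b, d]) from rfl,
            fstep_cons, if_neg hac]
          rfl

theorem foldl_cancel_fstep (w : List Char) (c : Char) (t : List Char) :
    w.foldl cancelB (fstep c t) = fstep c (w.foldl cancelB t) := by
  induction w generalizing t with
  | nil => rfl
  | cons d w ih => simp only [List.foldl_cons, cancel_fstep_comm]; exact ih _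

-- prepending a letter to the word is the front-insertion step on the reduced word
theorem red_cons (c : Char) (w : List Char) : red (c :: w) = fstep c (red w) := by
  have h1 : cancelB [] c = fstep c [] := by simp [cancelB, fstep]
  simp only [red, List.foldl_cons, h1, foldl_cancel_fstep]

-- A's back branch is exactly a cancelB step
theorem stepA_back (t : List Char) (c : Char) (hc : c ≠ 'R') :
    stepA (false, t) c = (false, cancelB t c) := by
  have hlen : (0 < t.length ∧ t.getLast? = some c) ↔ (t ≠ [] ∧ t.getLast? = some c) := by
    simp [List.length_pos_iff]
  simp only [stepA, cancelB, hc, if_false, Bool.false_eq_true, hlen]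
  split <;> rfl

-- A's front branch is exactly an fstep
theorem stepA_front (t : List Char) (c : Char) (hc : c ≠ 'R') :
    stepA (true, t) c = (true, fstep c t) := by
  simp only [stepA, fstep, hc, if_false, if_true]
  split <;> rfl

-- the main invariant: A's state is (flag, red (front.reverse ++ back)) of B's routed state
theorem main_inv (cs : List Char) (f : Bool) (fr bk : List Char) :
    cs.foldl stepA (f, red (fr.reverse ++ bk))
      = ((cs.foldl routeB (f, fr, bk)).1,
         red ((cs.foldl routeB (f, fr, bk)).2.1.reverse ++ (cs.foldl routeB (f, fr, bk)).2.2)) := by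
  induction cs generalizing f fr bk with
  | nil => rfl
  | cons c cs ih =>
    simp only [List.foldl_cons]
    by_cases hR : c = 'R'
    · have : stepA (f, red (fr.reverse ++ bk)) c = (!f, red (fr.reverse ++ bk)) := by
        simp [stepA, hR]
      rw [this]
      have : routeB (f, fr, bk) c = (!f, fr, bk) := by simp [routeB, hR]
      rw [this]; exact ih _ _ _
    · cases f
      · have h1 : stepA (false, red (fr.reverse ++ bk)) c
            = (false, red (fr.reverse ++ (bk ++ [c]))) := by
          rw [stepA_back _ _ hR, ← List.append_assoc, red_append_singleton]
        have h2 : routeB (false, fr, bk) c = (false, fr, bk ++ [c]) := by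
          simp [routeB, hR]
        rw [h1, h2]; exact ih _ _ _
      · have h1 : stepA (true, red (fr.reverse ++ bk)) c
            = (true, red ((fr ++ [c]).reverse ++ bk)) := by
          rw [stepA_front _ _ hR]
          simp only [List.reverse_append, List.reverse_singleton,
            List.cons_append, List.nil_append, red_cons]
        have h2 : routeB (true, fr, bk) c = (true, fr ++ [c], bk) := by
          simp [routeB, hR]
        rw [h1, h2]; exact ih _ _ _

-- ===== VERDICT (by name: the statement is the Claim_ definition above) =====
theorem solve_spec : Claim_equal_solve := by
  intro S _
  unfold Spec_solve solve solve_alt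
  have h := main_inv S.toList false [] []
  simp only [List.reverse_nil, List.nil_append] at h
  rw [show (false, ([] : List Char)) = (false, red []) from rfl, h]
  rfl
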